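-- pv_equiv track=rewrite | github.com/kyliekoshet/ZyoniaRAG | external_enrichment/master_enrichment.py | _normalize_neighborhood
-- ===== SOURCE A (Python) =====
-- def _normalize_neighborhood(neighborhood: str) -> str:
--     """Normalize neighborhood name for consistent matching."""
--     # Remove commas first, then replace spaces and dashes with underscores
--     normalized = neighborhood.lower()
--     normalized = normalized.replace(",", "")  # Remove commas completely
--     normalized = normalized.replace(" ", "_")   # Replace spaces with underscores
--     normalized = normalized.replace("-", "_")   # Replace dashes with underscores
--     # Remove any double underscores that might result
--     while "__" in normalized:
--         normalized = normalized.replace("__", "_")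
--     return normalized.strip("_")
-- ===== SOURCE B (Python) =====
-- def _normalize_neighborhood(neighborhood: str) -> str:
--     """Normalize neighborhood name for consistent matching (single-pass scan)."""
--     out = []
--     for c in neighborhood.lower():
--         if c == ',':
--             continue
--         if c in (' ', '-', '_'):
--             if out and out[-1] != '_':
--                 out.append('_')
--         else:
--             out.append(c)
--     return ''.join(out).strip('_')
-- ===== Notes on version B (the rewrite author's own statement) =====
-- stated objective: alternative
-- what changed: Replaces the chain of str.replace passes plus the fixed-point while loop collapsing double underscores with a single left-to-right scan that deletes commas, emits at most one underscore per separator run (never a leading one), and strips a trailing underscore at the end.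
import Mathlib
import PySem

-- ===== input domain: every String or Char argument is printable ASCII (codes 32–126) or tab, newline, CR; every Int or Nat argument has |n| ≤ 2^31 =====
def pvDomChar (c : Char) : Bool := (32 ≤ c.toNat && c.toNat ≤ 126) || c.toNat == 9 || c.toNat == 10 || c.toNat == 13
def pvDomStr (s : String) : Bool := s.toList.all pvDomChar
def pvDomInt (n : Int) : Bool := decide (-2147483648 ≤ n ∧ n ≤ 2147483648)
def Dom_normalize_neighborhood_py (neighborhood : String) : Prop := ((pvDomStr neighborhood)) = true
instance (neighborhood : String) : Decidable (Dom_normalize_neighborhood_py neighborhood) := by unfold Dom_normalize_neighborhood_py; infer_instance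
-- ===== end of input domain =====

-- B replaces A's chained str.replace passes plus the fixed-point while-loop on "__" by one
-- left-to-right scan with a last-char state; same return value (alternative decomposition, not claimed faster).

-- ===== PORT A =====
-- Helpers for port A's termination proof (cited by name in decreasing_by): pvF is one pass of
-- replace("__","_"), pvHasDD decides '"__" in s'; pv_replace_lt shows each while-iteration shortens s.
def pvF : List Char → List Char
  | [] => []
  | [a] => [a]
  | a :: b :: t => if a = '_' ∧ b = '_' then '_' :: pvF t else a :: pvF (b :: t)

def pvHasDD : List Char → Bool
  | [] => false
  | [_] => false
  | a :: b :: t => (a = '_' ∧ b = '_') || pvHasDD (b :: t)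

theorem pvF_le (l : List Char) : (pvF l).length ≤ l.length := by
  fun_induction pvF l <;> simp_all
  omega

theorem pvF_length_lt (l : List Char) (h : pvHasDD l = true) : (pvF l).length < l.length := by
  fun_induction pvF l with
  | case1 => simp [pvHasDD] at h
  | case2 a => simp [pvHasDD] at h
  | case3 a b t hab ih =>
      have := pvF_le t
      simp only [List.length_cons]
      omega
  | case4 a b t hab ih =>
      have h' : pvHasDD (b :: t) = true := by
        have h2 := h
        simp only [pvHasDD, Bool.or_eq_true, decide_eq_true_eq] at h2
        rcases h2 with h1 | h1
        · exact absurd h1 hab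
        · exact h1
      have := ih h'
      simp only [List.length_cons] at this ⊢
      omega

theorem pv_go2 (fuel : Nat) (l acc : List Char) (h : l.length ≤ fuel) :
    PySem.Chars.replace.go ['_','_'] ['_'] fuel l acc = acc.reverse ++ pvF l := by
  induction fuel generalizing l acc with
  | zero => cases l with
    | nil => simp [PySem.Chars.replace.go, pvF]
    | cons c t => simp at h
  | succ fuel ih =>
    cases l with
    | nil => simp [PySem.Chars.replace.go, pvF]
    | cons c t =>
      cases t with
      | nil =>
        have hc : ¬ (['_','_'].isPrefixOf [c] = true) := by
          rw [List.isPrefixOf_iff_prefix]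
          intro hx
          rw [List.cons_prefix_cons] at hx
          simp [List.prefix_nil] at hx
        simp only [PySem.Chars.replace.go, if_neg hc]
        rw [ih _ _ (by simp)]
        simp [pvF]
      | cons b t' =>
        by_cases hab : c = '_' ∧ b = '_'
        · have hp : ['_','_'].isPrefixOf (c :: b :: t') = true := by
            rw [List.isPrefixOf_iff_prefix, List.cons_prefix_cons, List.cons_prefix_cons]
            exact ⟨hab.1.symm, hab.2.symm, List.nil_prefix⟩
          simp only [PySem.Chars.replace.go, if_pos hp]
          rw [show List.drop ['_','_'].length (c :: b :: t') = t' by simp]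
          rw [ih _ _ (by simp at h ⊢; omega)]
          simp [pvF, hab]
        · have hp : ¬ (['_','_'].isPrefixOf (c :: b :: t') = true) := by
            rw [List.isPrefixOf_iff_prefix]
            intro hx
            rw [List.cons_prefix_cons, List.cons_prefix_cons] at hx
            exact hab ⟨hx.1.symm, hx.2.1.symm⟩
          simp only [PySem.Chars.replace.go, if_neg hp]
          rw [ih _ _ (by simp at h ⊢; omega)]
          simp [pvF, hab]

theorem pv_repl2 (l : List Char) : PySem.Chars.replace l ['_','_'] ['_'] = pvF l := by
  rw [PySem.Chars.replace]
  simp only [List.isEmpty_cons, Bool.false_eq_true, if_neg (by simp : ¬((['_','_'] : List Char).isEmpty = true))]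
  rw [pv_go2 _ _ _ le_rfl]
  simp

theorem pv_hasDD_iff (l : List Char) : pvHasDD l = true ↔ ['_','_'] <:+: l := by
  induction l with
  | nil => simp [pvHasDD]
  | cons a t ih =>
    cases t with
    | nil =>
      simp only [pvHasDD, Bool.false_eq_true, false_iff]
      intro hx
      have := hx.length_le
      simp at this
    | cons b t' =>
      rw [List.infix_cons_iff]
      simp only [pvHasDD, Bool.or_eq_true, decide_eq_true_eq, ih]
      constructor
      · rintro (⟨h1, h2⟩ | hh)
        · refine Or.inl ?_
          rw [List.cons_prefix_cons, List.cons_prefix_cons]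
          exact ⟨h1.symm, h2.symm, List.nil_prefix⟩
        · exact Or.inr hh
      · rintro (hh | hh)
        · rw [List.cons_prefix_cons, List.cons_prefix_cons] at hh
          exact Or.inl ⟨hh.1.symm, hh.2.1.symm⟩
        · exact Or.inr hh

theorem pv_isIn_eq_hasDD (l : List Char) : PySem.Chars.isIn ['_','_'] l = pvHasDD l := by
  by_cases h : pvHasDD l = true
  · rw [h, (PySem.Chars.isIn_iff_infix _ _).2 ((pv_hasDD_iff l).1 h)]
  · have h' := Bool.of_not_eq_true h
    rw [h', (PySem.Chars.isIn_eq_false_iff _ _).2 (fun hx => h ((pv_hasDD_iff l).2 hx))]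

theorem pv_replace_lt (s : String) (h : PySem.Str.isIn "__" s = true) :
    (PySem.Str.replace s "__" "_").toList.length < s.toList.length := by
  rw [PySem.Str.isIn] at h
  have h2 : pvHasDD s.toList = true := by
    rw [← pv_isIn_eq_hasDD]
    exact h
  rw [PySem.Str.replace]
  simp only [String.toList_ofList]
  rw [show ("__" : String).toList = ['_','_'] from rfl, show ("_" : String).toList = ['_'] from rfl]
  rw [pv_repl2]
  exact pvF_length_lt _ h2

-- the 'while "__" in normalized' loop of A
def pvAWhile (s : String) : String :=
  if h : PySem.Str.isIn "__" s = true then pvAWhile (PySem.Str.replace s "__" "_") else s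
termination_by s.toList.length
decreasing_by exact pv_replace_lt s h

def normalize_neighborhood_py (neighborhood : String) : String :=
  let n0 := PySem.Str.lower neighborhood
  let n1 := PySem.Str.replace n0 "," ""
  let n2 := PySem.Str.replace n1 " " "_"
  let n3 := PySem.Str.replace n2 "-" "_"
  let n4 := pvAWhile n3
  PySem.Str.stripChars n4 "_"

-- ===== PORT B =====
-- one step of B's scan: skip commas; a separator appends '_' only when out is non-empty and does not
-- already end in '_'; any other char is appended
def pvStepB (out : List Char) (c : Char) : List Char :=
  if c = ',' then out
  else if c = ' ' ∨ c = '-' ∨ c = '_' then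
    (if out ≠ [] ∧ out.getLast? ≠ some '_' then out ++ ['_'] else out)
  else out ++ [c]

def normalize_neighborhood_py_alt (neighborhood : String) : String :=
  let out := (PySem.Str.lower neighborhood).toList.foldl pvStepB []
  String.ofList (PySem.Chars.stripChars out ['_'])

-- ===== PRECONDITION & SPEC =====
def Spec_normalize_neighborhood_py (neighborhood : String) (out : String) : Prop := out = normalize_neighborhood_py_alt neighborhood
instance (neighborhood : String) (out : String) : Decidable (Spec_normalize_neighborhood_py neighborhood out) := by unfold Spec_normalize_neighborhood_py; infer_instance

-- ===== CLAIM (what is proved, stated in full; the proofs are below) =====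
def Claim_equal_normalize_neighborhood_py : Prop := ∀ (neighborhood : String), Dom_normalize_neighborhood_py neighborhood → Spec_normalize_neighborhood_py neighborhood (normalize_neighborhood_py neighborhood)

-- ===== LEMMAS AND PROOFS =====
-- pvG: the per-char effect of A's three single-char replace passes; pvSq: '_'-runs collapsed
-- (the fixed point of A's while loop); pvScan: B's scan as a function of the state "may a '_' be emitted".
def pvG (x : Char) : List Char :=
  if x = ',' then [] else if x = ' ' then ['_'] else if x = '-' then ['_'] else [x]

def pvSq : List Char → List Char
  | [] => []
  | [a] => [a]
  | a :: b :: t => if a = '_' ∧ b = '_' then pvSq (b :: t) else a :: pvSq (b :: t)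

def pvScan : Bool → List Char → List Char
  | _, [] => []
  | b, c :: t => if c = '_' then (if b then '_' :: pvScan false t else pvScan b t) else c :: pvScan true t

def pvCan (acc : List Char) : Bool := decide (acc ≠ [] ∧ acc.getLast? ≠ some '_')

theorem pv_go1 (c : Char) (new : List Char) (fuel : Nat) (l acc : List Char) (h : l.length ≤ fuel) :
    PySem.Chars.replace.go [c] new fuel l acc = acc.reverse ++ l.flatMap (fun x => if x = c then new else [x]) := by
  induction fuel generalizing l acc with
  | zero => cases l with
    | nil => simp [PySem.Chars.replace.go]
    | cons x t => simp at h
  | succ fuel ih =>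
    cases l with
    | nil => simp [PySem.Chars.replace.go]
    | cons x t =>
      by_cases hx : x = c
      · have hp : [c].isPrefixOf (x :: t) = true := by
          rw [List.isPrefixOf_iff_prefix, List.cons_prefix_cons]
          exact ⟨hx.symm, List.nil_prefix⟩
        simp only [PySem.Chars.replace.go, if_pos hp]
        rw [show List.drop [c].length (x :: t) = t by simp]
        rw [ih _ _ (by simp at h; omega)]
        simp [hx]
      · have hp : ¬ ([c].isPrefixOf (x :: t) = true) := by
          rw [List.isPrefixOf_iff_prefix]
          intro hh
          rw [List.cons_prefix_cons] at hh
          exact hx hh.1.symm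
        simp only [PySem.Chars.replace.go, if_neg hp]
        rw [ih _ _ (by simp at h; omega)]
        simp [hx]

theorem pv_repl1 (l : List Char) (c : Char) (new : List Char) :
    PySem.Chars.replace l [c] new = l.flatMap (fun x => if x = c then new else [x]) := by
  rw [PySem.Chars.replace]
  simp only [List.isEmpty_cons, Bool.false_eq_true]
  rw [pv_go1 _ _ _ _ _ le_rfl]
  simp

theorem pv_flatMap_comp (l : List Char) :
    ((l.flatMap (fun x => if x = ',' then [] else [x])).flatMap
        (fun x => if x = ' ' then ['_'] else [x])).flatMap
      (fun x => if x = '-' then ['_'] else [x]) = l.flatMap pvG := by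
  induction l with
  | nil => simp
  | cons x t ih =>
    simp only [List.flatMap_cons, List.flatMap_append, ih, pvG]
    congr 1
    by_cases h1 : x = ','
    · simp [h1]
    · by_cases h2 : x = ' '
      · simp [h1, h2]
      · by_cases h3 : x = '-'
        · simp [h1, h2, h3]
        · simp [h1, h2, h3]

theorem pv_sq_cons (a : Char) (l : List Char) :
    pvSq (a :: l) = if a = '_' ∧ l.head? = some '_' then pvSq l else a :: pvSq l := by
  cases l with
  | nil => simp [pvSq]
  | cons b t => simp [pvSq]

theorem pv_sq_of_no_dd (l : List Char) (h : pvHasDD l = false) : pvSq l = l := by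
  fun_induction pvSq l with
  | case1 => rfl
  | case2 a => rfl
  | case3 a b t hab ih =>
      simp only [pvHasDD, Bool.or_eq_false_iff, decide_eq_false_iff_not] at h
      exact absurd hab h.1
  | case4 a b t hab ih =>
      simp only [pvHasDD, Bool.or_eq_false_iff] at h
      rw [ih h.2]

theorem pvF_head (l : List Char) : (pvF l).head? = l.head? := by
  fun_induction pvF l with
  | case1 => rfl
  | case2 a => rfl
  | case3 a b t hab ih => simp [hab.1]
  | case4 a b t hab ih => simp

theorem pv_sq_F (l : List Char) : pvSq (pvF l) = pvSq l := by
  fun_induction pvF l with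
  | case1 => rfl
  | case2 a => rfl
  | case3 a b t hab ih =>
      obtain ⟨ha, hb⟩ := hab
      subst ha; subst hb
      rw [pv_sq_cons, pvF_head]
      by_cases h : t.head? = some '_' <;> simp [h, ih, pv_sq_cons]
  | case4 a b t hab ih =>
      rw [pv_sq_cons, pvF_head]
      rw [show ((b :: t).head? = some b) from rfl]
      rw [show pvSq (a :: b :: t) = a :: pvSq (b :: t) from by simp [pvSq, hab]]
      have : ¬ (a = '_' ∧ some b = some '_') := by
        intro hx
        exact hab ⟨hx.1, Option.some_injective _ hx.2⟩
      simp only [if_neg this, ih]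

theorem pv_while_eq_sq (s : String) : (pvAWhile s).toList = pvSq s.toList := by
  fun_induction pvAWhile s with
  | case1 s h ih =>
      rw [ih]
      rw [PySem.Str.replace]
      simp only [String.toList_ofList]
      rw [show ("__" : String).toList = ['_','_'] from rfl, show ("_" : String).toList = ['_'] from rfl]
      rw [pv_repl2, pv_sq_F]
  | case2 s h =>
      have h2 : pvHasDD s.toList = false := by
        rw [← pv_isIn_eq_hasDD]
        rw [PySem.Str.isIn] at h
        rw [show ("__" : String).toList = ['_','_'] from rfl] at h
        exact Bool.of_not_eq_true h
      rw [pv_sq_of_no_dd _ h2]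

theorem pv_scan_sq_aux (n : Nat) : ∀ l : List Char, l.length ≤ n →
    (pvScan true l = pvSq l ∧ '_' :: pvScan false l = pvSq ('_' :: l)) := by
  induction n with
  | zero =>
    intro l hl
    have : l = [] := List.eq_nil_of_length_eq_zero (Nat.le_zero.1 hl)
    subst this
    exact ⟨rfl, rfl⟩
  | succ n ih =>
    intro l hl
    cases l with
    | nil => exact ⟨rfl, rfl⟩
    | cons c t =>
      have ht : t.length ≤ n := by simp at hl; omega
      obtain ⟨ih1, ih2⟩ := ih t ht
      constructor
      · by_cases hc : c = '_'
        · subst hc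
          rw [show pvScan true ('_' :: t) = '_' :: pvScan false t from by simp [pvScan]]
          exact ih2
        · simp only [pvScan, if_neg hc]
          rw [ih1, pv_sq_cons]
          simp [hc]
      · by_cases hc : c = '_'
        · subst hc
          rw [show pvSq ('_' :: '_' :: t) = pvSq ('_' :: t) from by simp [pvSq]]
          rw [← ih2]
          simp [pvScan]
        · simp only [pvScan, if_neg hc]
          rw [show pvSq ('_' :: c :: t) = '_' :: pvSq (c :: t) from by simp [pvSq, hc]]
          rw [show pvSq (c :: t) = c :: pvSq t from by rw [pv_sq_cons]; simp [hc]]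
          rw [ih1]

theorem pv_scan_true_eq_sq (l : List Char) : pvScan true l = pvSq l :=
  (pv_scan_sq_aux l.length l le_rfl).1

theorem pv_sq_underscore (l : List Char) : pvSq ('_' :: l) = '_' :: pvScan false l :=
  ((pv_scan_sq_aux l.length l le_rfl).2).symm

theorem pv_scan_false_no_lead (l : List Char) :
    (pvScan false l).dropWhile (fun c => c == '_') = pvScan false l := by
  induction l with
  | nil => rfl
  | cons c t ih =>
    by_cases hc : c = '_'
    · subst hc
      simp only [pvScan, if_pos rfl, Bool.false_eq_true, if_neg (by simp : ¬ (false = true))]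
      exact ih
    · simp only [pvScan, if_neg hc]
      rw [List.dropWhile_cons_of_neg (by simp [hc])]

theorem pv_dropWhile_sq (l : List Char) :
    (pvSq l).dropWhile (fun c => c == '_') = pvScan false l := by
  cases l with
  | nil => rfl
  | cons c t =>
    by_cases hc : c = '_'
    · subst hc
      rw [pv_sq_underscore]
      rw [List.dropWhile_cons_of_pos (by simp)]
      exact pv_scan_false_no_lead t
    · rw [show pvSq (c :: t) = c :: pvSq t from by rw [pv_sq_cons]; simp [hc]]
      rw [List.dropWhile_cons_of_neg (by simp [hc])]
      simp only [pvScan, if_neg hc]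
      rw [← pv_scan_true_eq_sq]

theorem pv_fold_scan (l : List Char) : ∀ acc : List Char,
    l.foldl pvStepB acc = acc ++ pvScan (pvCan acc) (l.flatMap pvG) := by
  induction l with
  | nil => intro acc; simp [pvScan]
  | cons c t ih =>
    intro acc
    by_cases h1 : c = ','
    · subst h1
      rw [List.foldl_cons, show pvStepB acc ',' = acc from by simp [pvStepB]]
      rw [ih acc]
      simp [pvG]
    · by_cases h2 : c = ' ' ∨ c = '-' ∨ c = '_'
      · have hg : pvG c = ['_'] := by
          rcases h2 with h | h | h <;> simp [pvG, h]
        rw [List.foldl_cons]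
        by_cases hguard : acc ≠ [] ∧ acc.getLast? ≠ some '_'
        · rw [show pvStepB acc c = acc ++ ['_'] from by
            simp only [pvStepB, if_neg h1, if_pos h2, if_pos hguard]]
          rw [ih]
          have hc1 : pvCan acc = true := decide_eq_true hguard
          have hc2 : pvCan (acc ++ ['_']) = false := by
            simp [pvCan]
          rw [hc2, List.flatMap_cons, hg, List.singleton_append]
          rw [show pvScan (pvCan acc) ('_' :: t.flatMap pvG) = '_' :: pvScan false (t.flatMap pvG) from by
            rw [hc1]; simp [pvScan]]
          simp
        · rw [show pvStepB acc c = acc from by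
            simp only [pvStepB, if_neg h1, if_pos h2, if_neg hguard]]
          rw [ih]
          have hc1 : pvCan acc = false := decide_eq_false hguard
          rw [List.flatMap_cons, hg, hc1, List.singleton_append]
          rw [show pvScan false ('_' :: t.flatMap pvG) = pvScan false (t.flatMap pvG) from by
            simp [pvScan]]
      · have hne : c ≠ '_' := fun hx => h2 (Or.inr (Or.inr hx))
        have hg : pvG c = [c] := by
          have h3 : c ≠ ' ' := fun hx => h2 (Or.inl hx)
          have h4 : c ≠ '-' := fun hx => h2 (Or.inr (Or.inl hx))
          simp [pvG, h1, h3, h4]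
        rw [List.foldl_cons, show pvStepB acc c = acc ++ [c] from by
          simp only [pvStepB, if_neg h1, if_neg h2]]
        rw [ih]
        have hc2 : pvCan (acc ++ [c]) = true := by
          simp [pvCan, hne]
        rw [hc2, List.flatMap_cons, hg, List.singleton_append]
        rw [show pvScan (pvCan acc) (c :: t.flatMap pvG) = c :: pvScan true (t.flatMap pvG) from by
          simp [pvScan, hne]]
        simp

theorem pv_strip_eq (m : List Char) :
    PySem.Chars.stripChars (pvSq m) ['_'] = PySem.Chars.stripChars (pvScan false m) ['_'] := by
  have hp : (fun c => (['_'] : List Char).contains c) = (fun c : Char => c == '_') := by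
    funext c; cases h : (c == '_') <;> simp_all
  rw [PySem.Chars.stripChars, PySem.Chars.stripChars]
  rw [hp, pv_dropWhile_sq, pv_scan_false_no_lead]

theorem pv_final (s : String) : normalize_neighborhood_py s = normalize_neighborhood_py_alt s := by
  apply String.ext
  unfold normalize_neighborhood_py normalize_neighborhood_py_alt
  simp only [PySem.Str.stripChars, PySem.Str.replace, PySem.Str.lower, String.toList_ofList]
  rw [show ("_" : String).toList = ['_'] from rfl]
  rw [pv_while_eq_sq]
  simp only [String.toList_ofList]
  rw [show ("," : String).toList = [','] from rfl, show ("" : String).toList = [] from rfl]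
  rw [show (" " : String).toList = [' '] from rfl, show ("-" : String).toList = ['-'] from rfl]
  rw [pv_repl1, pv_repl1, pv_repl1]
  rw [pv_flatMap_comp (PySem.Chars.lower s.toList)]
  rw [pv_fold_scan]
  rw [show pvCan [] = false from rfl]
  rw [List.nil_append]
  exact pv_strip_eq _

-- ===== VERDICT (by name: the statement is the Claim_ definition above) =====
theorem normalize_neighborhood_py_spec : Claim_equal_normalize_neighborhood_py := by
  intro neighborhood _
  exact pv_final neighborhood
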